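-- pv_equiv track=rewrite | github.com/ki-la/SCE-Solver | results/evaluation.py | split_solved_unsolved
-- ===== SOURCE A (Python) =====
-- def split_solved_unsolved(k, values):
--     """
--     splits 'values' into solved and unsolved instances based on the values in 'k'
--     :param k: array of solution sizes (-1, if the instance was not solved)
--     :param values: array of arrays containing other values collected for the instances
--     :return:
--     """
--     solved_k, solved_arr = [], [[] for _ in range(len(values))]
--     unsolved_k, unsolved_arr = [], [[] for _ in range(len(values))]
--     for i in range(len(k)):
--         if k[i] != -1:
--             solved_k.append(k[i])
--             for j in range(len(values)):
--                 solved_arr[j].append(values[j][i])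
--         else:
--             for j in range(len(values)):
--                 unsolved_arr[j].append(values[j][i])
--
--     return solved_k, solved_arr, unsolved_arr
-- ===== SOURCE B (Python) =====
-- def split_solved_unsolved(k, values):
--     solved_idx = [i for i, x in enumerate(k) if x != -1]
--     unsolved_idx = [i for i, x in enumerate(k) if x == -1]
--     solved_k = [k[i] for i in solved_idx]
--     solved_arr = [[row[i] for i in solved_idx] for row in values]
--     unsolved_arr = [[row[i] for i in unsolved_idx] for row in values]
--     return solved_k, solved_arr, unsolved_arr
-- ===== Notes on version B (the rewrite author's own statement) =====
-- stated objective: simpler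
-- what changed: Replaces A's row-major loop (per instance, with an inner loop appending to every value-array) by a column-major decomposition: one enumerate pass builds solved/unsolved index lists, then each output list is a single comprehension over those indices.
import Mathlib
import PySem

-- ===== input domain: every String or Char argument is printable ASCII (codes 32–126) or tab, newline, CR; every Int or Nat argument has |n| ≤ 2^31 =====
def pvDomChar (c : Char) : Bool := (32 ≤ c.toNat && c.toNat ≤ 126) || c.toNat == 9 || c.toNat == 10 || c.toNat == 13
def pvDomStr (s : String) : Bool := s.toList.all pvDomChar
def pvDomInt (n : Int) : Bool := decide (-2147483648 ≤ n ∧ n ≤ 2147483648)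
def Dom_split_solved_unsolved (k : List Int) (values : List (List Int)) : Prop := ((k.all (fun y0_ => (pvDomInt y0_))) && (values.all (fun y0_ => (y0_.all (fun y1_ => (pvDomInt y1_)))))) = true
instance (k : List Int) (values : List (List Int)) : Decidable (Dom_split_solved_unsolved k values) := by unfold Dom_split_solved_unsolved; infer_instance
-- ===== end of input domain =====

-- B swaps A's loop nesting: one pass over k builds solved/unsolved index lists, then each
-- output row is a single comprehension over those indices (objective: simpler; same cost).

-- ===== PORT A =====
def split_solved_unsolved (k : List Int) (values : List (List Int)) : List Int × List (List Int) × List (List Int) :=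
  (PySem.List.pyRange 0 k.length 1).foldl
    (fun st i =>
      let ki := (PySem.List.pyGet? k i).getD 0
      if ki ≠ -1 then
        (st.1 ++ [ki],
         List.zipWith (fun sj row => sj ++ [(PySem.List.pyGet? row i).getD 0]) st.2.1 values,
         st.2.2)
      else
        (st.1, st.2.1,
         List.zipWith (fun uj row => uj ++ [(PySem.List.pyGet? row i).getD 0]) st.2.2 values))
    ([], List.replicate values.length [], List.replicate values.length [])

-- ===== PORT B =====
def split_solved_unsolved_alt (k : List Int) (values : List (List Int)) : List Int × List (List Int) × List (List Int) :=
  let solvedIdx := ((PySem.List.enumerate k).filter (fun p => p.2 != -1)).map (fun p => p.1)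
  let unsolvedIdx := ((PySem.List.enumerate k).filter (fun p => p.2 == -1)).map (fun p => p.1)
  (solvedIdx.map (fun i => (PySem.List.pyGet? k i).getD 0),
   values.map (fun row => solvedIdx.map (fun i => (PySem.List.pyGet? row i).getD 0)),
   values.map (fun row => unsolvedIdx.map (fun i => (PySem.List.pyGet? row i).getD 0)))

-- ===== PRECONDITION & SPEC =====
-- Pre_ excludes exactly the inputs where Python A raises IndexError: some row of
-- 'values' is shorter than k, so values[j][i] is out of range for some i < len(k).
def Pre_split_solved_unsolved (k : List Int) (values : List (List Int)) : Prop :=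
  ∀ row ∈ values, k.length ≤ row.length
instance (k : List Int) (values : List (List Int)) : Decidable (Pre_split_solved_unsolved k values) := by unfold Pre_split_solved_unsolved; infer_instance
def pvWitness_split_solved_unsolved : List Int × List (List Int) := ([1, -1], [[5, 6], [7, 8]])

def Spec_split_solved_unsolved (k : List Int) (values : List (List Int)) (out : List Int × List (List Int) × List (List Int)) : Prop := out = split_solved_unsolved_alt k values
instance (k : List Int) (values : List (List Int)) (out : List Int × List (List Int) × List (List Int)) : Decidable (Spec_split_solved_unsolved k values out) := by unfold Spec_split_solved_unsolved; infer_instance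

-- ===== CLAIM (what is proved, stated in full; the proofs are below) =====
def Claim_equal_split_solved_unsolved : Prop := ∀ (k : List Int) (values : List (List Int)), Dom_split_solved_unsolved k values → Pre_split_solved_unsolved k values → Spec_split_solved_unsolved k values (split_solved_unsolved k values)

-- ===== LEMMAS AND PROOFS =====

theorem pyGet?_append_lt (k : List Int) (x i : Int) (h0 : 0 ≤ i) (h1 : i < k.length) :
    PySem.List.pyGet? (k ++ [x]) i = PySem.List.pyGet? k i := by
  rw [PySem.List.pyGet?_of_nonneg (h := h0), PySem.List.pyGet?_of_nonneg (h := h0),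
      List.getElem?_append_left (by omega)]

theorem zip_col (v : List (List Int)) (f : List Int → List Int) (g : List Int → Int) :
    List.zipWith (fun sj row => sj ++ [g row]) (v.map f) v
    = v.map (fun row => f row ++ [g row]) := by
  induction v with
  | nil => simp
  | cons r v ih => simp [ih]

theorem step_last (k : List Int) (x : Int) (values : List (List Int)) :
    (fun (st : List Int × List (List Int) × List (List Int)) (i : Int) =>
      let ki := (PySem.List.pyGet? (k ++ [x]) i).getD 0
      if ki ≠ -1 then
        (st.1 ++ [ki],
         List.zipWith (fun sj row => sj ++ [(PySem.List.pyGet? row i).getD 0]) st.2.1 values,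
         st.2.2)
      else
        (st.1, st.2.1,
         List.zipWith (fun uj row => uj ++ [(PySem.List.pyGet? row i).getD 0]) st.2.2 values))
      (split_solved_unsolved_alt k values) (k.length : Int)
    = split_solved_unsolved_alt (k ++ [x]) values := by
  unfold split_solved_unsolved_alt
  by_cases hx : x = -1
  all_goals
    simp [hx, PySem.List.enumerate_append, PySem.List.enumerate_cons, PySem.List.enumerate_nil]
    refine ⟨?_, ?_⟩
    · intro a b hmem _
      obtain ⟨j, hj, heq⟩ := (PySem.List.mem_enumerate_iff _ _ _).mp hmem
      have ha : a = (j : Int) := by simpa using congrArg Prod.fst heq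
      rw [ha, pyGet?_append_lt k _ _ (by positivity) (by exact_mod_cast hj)]
    · exact zip_col values _ _

theorem main_eq (k : List Int) (values : List (List Int)) :
    split_solved_unsolved k values = split_solved_unsolved_alt k values := by
  induction k using List.reverseRecOn with
  | nil =>
      simp [split_solved_unsolved, split_solved_unsolved_alt,
            PySem.List.enumerate_nil, List.map_const']
  | append_singleton k x ih =>
      unfold split_solved_unsolved at ih ⊢
      have hcong : ∀ i ∈ PySem.List.pyRange 0 (k.length : Int),
          ∀ acc : List Int × List (List Int) × List (List Int),
          (fun (st : List Int × List (List Int) × List (List Int)) (i : Int) =>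
            let ki := (PySem.List.pyGet? (k ++ [x]) i).getD 0
            if ki ≠ -1 then
              (st.1 ++ [ki],
               List.zipWith (fun sj row => sj ++ [(PySem.List.pyGet? row i).getD 0]) st.2.1 values,
               st.2.2)
            else
              (st.1, st.2.1,
               List.zipWith (fun uj row => uj ++ [(PySem.List.pyGet? row i).getD 0]) st.2.2 values)) acc i
          = (fun (st : List Int × List (List Int) × List (List Int)) (i : Int) =>
            let ki := (PySem.List.pyGet? k i).getD 0
            if ki ≠ -1 then
              (st.1 ++ [ki],
               List.zipWith (fun sj row => sj ++ [(PySem.List.pyGet? row i).getD 0]) st.2.1 values,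
               st.2.2)
            else
              (st.1, st.2.1,
               List.zipWith (fun uj row => uj ++ [(PySem.List.pyGet? row i).getD 0]) st.2.2 values)) acc i := by
        intro i hi acc
        have hb := (PySem.List.mem_pyRange_one (a := 0) (b := (k.length : Int)) (x := i)).mp hi
        simp only [pyGet?_append_lt k x i hb.1 hb.2]
      rw [show ((k ++ [x]).length : Int) = (k.length : Int) + 1 by simp,
          PySem.List.pyRange_one_succ_right (by positivity), List.foldl_append,
          PySem.List.foldl_congr_mem' _ _ _ _ hcong, ih,
          List.foldl_cons, List.foldl_nil]
      exact step_last k x values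

-- ===== VERDICT (by name: the statement is the Claim_ definition above) =====
theorem split_solved_unsolved_spec : Claim_equal_split_solved_unsolved := by
  intro k values _ _
  unfold Spec_split_solved_unsolved
  exact main_eq k values
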